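-- pv_equiv track=rewrite | github.com/joshanashakya/dissertation | workspace/dataset/java-python/GeeksForGeeks/4526/A/2.py | countUnsetBits
-- ===== SOURCE A (Python) =====
-- def countUnsetBits(n) :
--
--     # To store the count of unset bits
--     cnt = 0;
--
--     # For every integer from the range [1, n]
--     for i in range(1, n + 1) :
--
--         # A copy of the current integer
--         temp = i;
--
--         # Count of unset bits in
--         # the current integer
--         while (temp) :
--
--             # If current bit is unset
--             if (temp % 2 == 0) :
--                 cnt += 1;
--
--             temp = temp // 2;
--
--     return cnt;
-- ===== SOURCE B (Python) =====
-- def countUnsetBits(n):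
--     # Per-bit-position counting: for each bit position j with 2^j <= n,
--     # count the integers in [1, n] whose binary representation has a 0 at
--     # position j (positions above an integer's leading bit do not count).
--     total = 0
--     j = 0
--     while (1 << j) <= n:
--         p = 1 << j
--         cycle = 2 * p
--         ones = (n + 1) // cycle * p + max(0, (n + 1) % cycle - p)
--         # ones = how many i in [1, n] have bit j set;
--         # p - 1 = how many i in [1, n] are below 2^j (bit j outside their width)
--         total += (n - ones) - (p - 1)
--         j += 1
--     return total
-- ===== Notes on version B (the rewrite author's own statement) =====
-- stated objective: faster
-- what changed: Instead of scanning the bits of every integer in [1, n], B counts, for each bit position j with 2^j <= n, how many integers in [1, n] have a zero at position j inside their binary representation, via a closed-form division/modulo formula per position.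
import Mathlib
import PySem

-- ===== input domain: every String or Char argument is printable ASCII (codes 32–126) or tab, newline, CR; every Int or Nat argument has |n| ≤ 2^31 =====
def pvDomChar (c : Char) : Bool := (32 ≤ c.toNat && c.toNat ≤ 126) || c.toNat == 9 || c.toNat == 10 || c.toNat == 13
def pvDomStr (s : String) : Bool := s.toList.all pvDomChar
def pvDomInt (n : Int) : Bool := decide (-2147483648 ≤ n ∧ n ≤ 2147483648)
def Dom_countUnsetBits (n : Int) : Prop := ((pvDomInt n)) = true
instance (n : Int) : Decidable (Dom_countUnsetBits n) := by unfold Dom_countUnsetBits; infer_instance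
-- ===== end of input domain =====

-- B replaces A's per-integer inner bit loop by a per-bit-position counting formula:
-- O(log n) arithmetic steps instead of O(n log n) bit inspections (objective: faster, asymptotic).

-- ===== PORT A =====
-- inner 'while (temp)' loop of A; temp is always ≥ 1 when entered (i ranges over [1, n]),
-- so the guard '0 < temp' (needed for termination) coincides with Python's 'temp != 0' there.
def innerA (temp cnt : Int) : Int :=
  if h : 0 < temp then
    innerA (PySem.Int.floordiv temp 2) (if PySem.Int.mod temp 2 = 0 then cnt + 1 else cnt)
  else cnt
termination_by temp.toNat
decreasing_by
  rw [PySem.Int.floordiv_eq_ediv_of_pos (by norm_num)]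
  omega

def countUnsetBits (n : Int) : Int :=
  (PySem.List.pyRange 1 (n + 1) 1).foldl (fun cnt i => innerA i cnt) 0

-- ===== PORT B =====
-- B's 'while (1 << j) <= n' loop; p = 2^j.
def altLoop (n : Int) (j : Nat) (total : Int) : Int :=
  if h : (2 : Int) ^ j ≤ n then
    let p : Int := 2 ^ j
    let cycle := 2 * p
    let ones := PySem.Int.floordiv (n + 1) cycle * p + max 0 (PySem.Int.mod (n + 1) cycle - p)
    altLoop n (j + 1) (total + ((n - ones) - (p - 1)))
  else total
termination_by (n + 1 - 2 ^ j).toNat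
decreasing_by
  have h1 : (0 : Int) < 2 ^ j := pow_pos (by norm_num) j
  have h2 : (2 : Int) ^ (j + 1) = 2 ^ j * 2 := pow_succ 2 j
  omega

def countUnsetBits_alt (n : Int) : Int := altLoop n 0 0

-- ===== PRECONDITION & SPEC =====
def Spec_countUnsetBits (n : Int) (out : Int) : Prop := out = countUnsetBits_alt n
instance (n : Int) (out : Int) : Decidable (Spec_countUnsetBits n out) := by unfold Spec_countUnsetBits; infer_instance

-- ===== CLAIM (what is proved, stated in full; the proofs are below) =====
def Claim_equal_countUnsetBits : Prop := ∀ (n : Int), Dom_countUnsetBits n → Spec_countUnsetBits n (countUnsetBits n)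

-- ===== LEMMAS AND PROOFS =====

theorem innerA_acc (temp cnt : Int) : innerA temp cnt = cnt + innerA temp 0 := by
  by_cases h : 0 < temp
  · conv_lhs => rw [innerA]
    conv_rhs => rw [innerA]
    rw [dif_pos h, dif_pos h,
      innerA_acc (PySem.Int.floordiv temp 2)
        (if PySem.Int.mod temp 2 = 0 then cnt + 1 else cnt),
      innerA_acc (PySem.Int.floordiv temp 2)
        (if PySem.Int.mod temp 2 = 0 then (0 : Int) + 1 else 0)]
    split_ifs <;> ring
  · conv_lhs => rw [innerA]
    conv_rhs => rw [innerA]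
    rw [dif_neg h, dif_neg h]; ring
termination_by temp.toNat
decreasing_by
  all_goals
    rw [PySem.Int.floordiv_eq_ediv_of_pos (by norm_num)]
    omega

theorem altLoop_acc (n : Int) (j : Nat) (t : Int) : altLoop n j t = t + altLoop n j 0 := by
  by_cases h : (2 : Int) ^ j ≤ n
  · conv_lhs => rw [altLoop]
    conv_rhs => rw [altLoop]
    rw [dif_pos h, dif_pos h, altLoop_acc n (j + 1), altLoop_acc n (j + 1)
      ((0 : Int) + ((n - (PySem.Int.floordiv (n + 1) (2 * 2 ^ j) * 2 ^ j +
        max 0 (PySem.Int.mod (n + 1) (2 * 2 ^ j) - 2 ^ j))) - (2 ^ j - 1)))]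
    ring
  · conv_lhs => rw [altLoop]
    conv_rhs => rw [altLoop]
    rw [dif_neg h, dif_neg h]; ring
termination_by (n + 1 - 2 ^ j).toNat
decreasing_by
  all_goals
    have h1 : (0 : Int) < 2 ^ j := pow_pos (by norm_num) j
    have h2 : (2 : Int) ^ (j + 1) = 2 ^ j * 2 := pow_succ 2 j
    omega

-- zeros of n at bit positions ≥ j that lie inside n's binary representation
def zbHigh (n : Int) (j : Nat) : Int :=
  if h : (2 : Int) ^ j ≤ n then
    (if n % 2 ^ (j + 1) < 2 ^ j then 1 else 0) + zbHigh n (j + 1)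
  else 0
termination_by (n + 1 - 2 ^ j).toNat
decreasing_by
  have h1 : (0 : Int) < 2 ^ j := pow_pos (by norm_num) j
  have h2 : (2 : Int) ^ (j + 1) = 2 ^ j * 2 := pow_succ 2 j
  omega

-- the 'ones' expression of B, with /, % in place of floordiv, mod
def onesF (p n : Int) : Int := (n + 1) / (2 * p) * p + max 0 ((n + 1) % (2 * p) - p)

theorem onesF_succ (p n : Int) (hp : 1 ≤ p) (hn : 1 ≤ n) :
    onesF p n = onesF p (n - 1) + (if n % (2 * p) < p then 0 else 1) := by
  have hd : (0 : Int) < 2 * p := by omega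
  have hqr : 2 * p * (n / (2 * p)) + n % (2 * p) = n := Int.ediv_add_emod n (2 * p)
  have hr0 : 0 ≤ n % (2 * p) := Int.emod_nonneg n (by omega)
  have hrd : n % (2 * p) < 2 * p := Int.emod_lt_of_pos n hd
  unfold onesF
  rw [show n - 1 + 1 = n by ring]
  by_cases hc : n % (2 * p) + 1 < 2 * p
  · have h1 : (n + 1) / (2 * p) = n / (2 * p) := by
      rw [show n + 1 = (n % (2 * p) + 1) + 2 * p * (n / (2 * p)) by omega,
        Int.add_mul_ediv_left _ _ (by omega : 2 * p ≠ 0),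
        Int.ediv_eq_zero_of_lt (by omega) hc, zero_add]
    have h2 : (n + 1) % (2 * p) = n % (2 * p) + 1 := by
      rw [show n + 1 = (n % (2 * p) + 1) + 2 * p * (n / (2 * p)) by omega,
        Int.add_mul_emod_self_left, Int.emod_eq_of_lt (by omega) hc]
    rw [h1, h2]
    split_ifs <;> omega
  · have hce : n % (2 * p) = 2 * p - 1 := by omega
    have heq : n + 1 = 2 * p * (n / (2 * p) + 1) := by
      calc n + 1 = 2 * p * (n / (2 * p)) + 2 * p := by omega
        _ = 2 * p * (n / (2 * p) + 1) := by ring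
    have h1 : (n + 1) / (2 * p) = n / (2 * p) + 1 := by
      rw [heq, Int.mul_ediv_cancel_left _ (by omega : 2 * p ≠ 0)]
    have h2 : (n + 1) % (2 * p) = 0 := by
      rw [heq, Int.mul_emod_right]
    rw [h1, h2]
    have hx : (n / (2 * p) + 1) * p = n / (2 * p) * p + p := by ring
    split_ifs <;> omega

theorem onesF_base (p : Int) (hp : 1 ≤ p) : onesF p (p - 1) = 0 := by
  unfold onesF
  rw [show p - 1 + 1 = p by ring,
    Int.ediv_eq_zero_of_lt (by omega) (by omega : p < 2 * p),
    Int.emod_eq_of_lt (by omega) (by omega : p < 2 * p)]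
  omega

-- (n / 2) % m = (n % (2 * m)) / 2, for the bit-test translation below
theorem ediv_two_emod (n m : Int) (hm : 0 < m) (hn : 0 ≤ n) :
    (n / 2) % m = (n % (2 * m)) / 2 := by
  have h2m : (0 : Int) < 2 * m := by omega
  have hqr : 2 * m * (n / (2 * m)) + n % (2 * m) = n := Int.ediv_add_emod n (2 * m)
  have hr0 : 0 ≤ n % (2 * m) := Int.emod_nonneg n (by omega)
  have hrd : n % (2 * m) < 2 * m := Int.emod_lt_of_pos n h2m
  set q := n / (2 * m) with hq
  set r := n % (2 * m) with hr
  have hne : n = r + 2 * (m * q) := by rw [← hqr]; ring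
  have h1 : n / 2 = r / 2 + m * q := by
    conv_lhs => rw [hne]
    rw [Int.add_mul_ediv_left _ _ (by omega : (2 : Int) ≠ 0)]
  rw [h1, Int.add_mul_emod_self_left, Int.emod_eq_of_lt (by omega)
    (by omega : r / 2 < m)]

theorem zbHigh_shift (n : Int) (j : Nat) (hn : 0 ≤ n) : zbHigh n (j + 1) = zbHigh (n / 2) j := by
  have hpj : (0 : Int) < 2 ^ j := pow_pos (by norm_num) j
  have hs : (2 : Int) ^ (j + 1) = 2 ^ j * 2 := pow_succ 2 j
  have hcond : ((2 : Int) ^ (j + 1) ≤ n) ↔ ((2 : Int) ^ j ≤ n / 2) := by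
    rw [Int.le_ediv_iff_mul_le (by norm_num : (0 : Int) < 2), ← hs]
  have hbit : (n % 2 ^ (j + 1 + 1) < 2 ^ (j + 1)) ↔ (n / 2 % 2 ^ (j + 1) < 2 ^ j) := by
    rw [ediv_two_emod n (2 ^ (j + 1)) (pow_pos (by norm_num) (j + 1)) hn,
      show (2 : Int) * 2 ^ (j + 1) = 2 ^ (j + 1 + 1) by rw [pow_succ]; ring,
      Int.ediv_lt_iff_lt_mul (by norm_num : (0 : Int) < 2), ← hs]
  by_cases h : (2 : Int) ^ (j + 1) ≤ n
  · have h' : (2 : Int) ^ j ≤ n / 2 := hcond.mp h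
    conv_lhs => rw [zbHigh]
    conv_rhs => rw [zbHigh]
    rw [dif_pos h, dif_pos h', zbHigh_shift n (j + 1) hn, if_congr hbit rfl rfl]
  · have h' : ¬ (2 : Int) ^ j ≤ n / 2 := fun hh => h (hcond.mpr hh)
    conv_lhs => rw [zbHigh]
    conv_rhs => rw [zbHigh]
    rw [dif_neg h, dif_neg h']
termination_by (n + 1 - 2 ^ (j + 1)).toNat
decreasing_by
  have h1 : (0 : Int) < 2 ^ (j + 1) := pow_pos (by norm_num) (j + 1)
  have h2 : (2 : Int) ^ (j + 1 + 1) = 2 ^ (j + 1) * 2 := pow_succ 2 (j + 1)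
  omega

theorem zbHigh_zero_eq_innerA (n : Int) (hn : 0 ≤ n) : zbHigh n 0 = innerA n 0 := by
  by_cases h : 0 < n
  · have hmod : PySem.Int.mod n 2 = n % 2 := PySem.Int.mod_eq_emod_of_pos (by norm_num)
    have hdiv : PySem.Int.floordiv n 2 = n / 2 := PySem.Int.floordiv_eq_ediv_of_pos (by norm_num)
    have hbit : (n % (2 : Int) ^ (0 + 1) < 2 ^ 0) ↔ (n % 2 = 0) := by norm_num; omega
    conv_rhs => rw [innerA]
    rw [dif_pos h, innerA_acc, hmod, hdiv]
    conv_lhs => rw [zbHigh]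
    rw [dif_pos (by norm_num; omega : (2 : Int) ^ 0 ≤ n), if_congr hbit rfl rfl,
      zbHigh_shift n 0 hn, zbHigh_zero_eq_innerA (n / 2) (by omega)]
    split_ifs <;> ring
  · have hn0 : n = 0 := by omega
    subst hn0
    conv_lhs => rw [zbHigh]
    conv_rhs => rw [innerA]
    norm_num
termination_by n.toNat
decreasing_by omega

theorem altLoop_diff (n : Int) (j : Nat) (hn : 1 ≤ n) :
    altLoop n j 0 = altLoop (n - 1) j 0 + zbHigh n j := by
  have hp : (0 : Int) < 2 ^ j := pow_pos (by norm_num) j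
  have hs : (2 : Int) ^ (j + 1) = 2 ^ j * 2 := pow_succ 2 j
  have hcyc : (0 : Int) < 2 * 2 ^ j := by omega
  have hones : ∀ m : Int, PySem.Int.floordiv (m + 1) (2 * 2 ^ j) * 2 ^ j +
      max 0 (PySem.Int.mod (m + 1) (2 * 2 ^ j) - 2 ^ j) = onesF (2 ^ j) m := by
    intro m
    rw [PySem.Int.floordiv_eq_ediv_of_pos hcyc, PySem.Int.mod_eq_emod_of_pos hcyc]
    rfl
  by_cases h : (2 : Int) ^ j ≤ n
  · have hterm : n - onesF (2 ^ j) n - (2 ^ j - 1) =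
        (n - 1 - onesF (2 ^ j) (n - 1) - (2 ^ j - 1)) +
        (if n % 2 ^ (j + 1) < 2 ^ j then 1 else 0) := by
      have := onesF_succ (2 ^ j) n (by omega) hn
      rw [show (2 : Int) * 2 ^ j = 2 ^ (j + 1) by omega] at this
      split_ifs at this ⊢ <;> omega
    by_cases h' : (2 : Int) ^ j ≤ n - 1
    · conv_lhs => rw [altLoop]
      conv_rhs => rw [altLoop]
      rw [dif_pos h, dif_pos h']
      simp only [zero_add]
      rw [altLoop_acc n (j + 1), altLoop_acc (n - 1) (j + 1), hones n, hones (n - 1),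
        altLoop_diff n (j + 1) hn]
      conv_rhs => rw [zbHigh]
      rw [dif_pos h, hterm]
      ring
    · -- n = 2^j exactly: the (n-1)-loop and all deeper levels are empty
      have hne : n = 2 ^ j := by omega
      have hstop : ¬ (2 : Int) ^ (j + 1) ≤ n := by omega
      have hbit : ¬ (n % 2 ^ (j + 1) < 2 ^ j) := by
        rw [Int.emod_eq_of_lt (by omega) (by omega)]; omega
      conv_lhs => rw [altLoop]
      rw [dif_pos h]
      simp only [zero_add]
      conv_lhs => rw [altLoop]
      rw [dif_neg hstop, hones n]
      conv_rhs => rw [altLoop]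
      rw [dif_neg h']
      conv_rhs => rw [zbHigh]
      rw [dif_pos h]
      conv_rhs => rw [zbHigh]
      rw [dif_neg hstop, if_neg hbit]
      have hsucc := onesF_succ (2 ^ j) n (by omega) hn
      rw [show (2 : Int) * 2 ^ j = 2 ^ (j + 1) by omega, if_neg hbit,
        show n - 1 = 2 ^ j - 1 by omega] at hsucc
      rw [hsucc, onesF_base (2 ^ j) (by omega)]
      omega
  · have h' : ¬ (2 : Int) ^ j ≤ n - 1 := by omega
    conv_lhs => rw [altLoop]
    conv_rhs => rw [altLoop]
    conv_rhs => rw [zbHigh]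
    rw [dif_neg h, dif_neg h', dif_neg h]
    ring
termination_by (n + 1 - 2 ^ j).toNat
decreasing_by
  have h1 : (0 : Int) < 2 ^ j := pow_pos (by norm_num) j
  have h2 : (2 : Int) ^ (j + 1) = 2 ^ j * 2 := pow_succ 2 j
  omega

theorem portsEq (n : Int) : countUnsetBits n = altLoop n 0 0 := by
  by_cases hn : 1 ≤ n
  · have hfold : countUnsetBits n = countUnsetBits (n - 1) + innerA n 0 := by
      unfold countUnsetBits
      rw [PySem.List.pyRange_one_succ_right (by omega : (1 : Int) ≤ n),
        List.foldl_append, show n - 1 + 1 = n by ring]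
      simp only [List.foldl_cons, List.foldl_nil]
      rw [innerA_acc]
    rw [hfold, portsEq (n - 1), altLoop_diff n 0 hn,
      zbHigh_zero_eq_innerA n (by omega)]
  · unfold countUnsetBits
    rw [PySem.List.pyRange_one_eq_nil (by omega), altLoop,
      dif_neg (by norm_num; omega : ¬ (2 : Int) ^ 0 ≤ n)]
    rfl
termination_by n.toNat
decreasing_by omega

-- ===== VERDICT (by name: the statement is the Claim_ definition above) =====
theorem countUnsetBits_spec : Claim_equal_countUnsetBits := by
  intro n _
  show countUnsetBits n = countUnsetBits_alt n
  unfold countUnsetBits_alt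
  exact portsEq n
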